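-- pv_equiv track=rewrite | github.com/junahmkh/GNN-Anomaly-Prediction-Dashboard | backend/data_preprocessing.py | make_edge_index
-- ===== SOURCE A (Python) =====
-- def make_edge_index(num_nodes):
--     edges = []
--     for i in range(num_nodes):
--         if i > 0:
--             edges.append([i, i - 1])
--         if i < num_nodes - 1:
--             edges.append([i, i + 1])
--     # Transpose to COO format (2 x num_edges)
--     edge_index = list(map(list, zip(*edges)))
--     return edge_index
-- ===== SOURCE B (Python) =====
-- def make_edge_index(num_nodes):
--     # Build the two COO rows directly from consecutive pairs; no edge list, no zip transpose.
--     src, dst = [], []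
--     for i in range(num_nodes - 1):
--         src += [i, i + 1]
--         dst += [i + 1, i]
--     return [src, dst] if src else []
-- ===== Notes on version B (the rewrite author's own statement) =====
-- stated objective: simpler
-- what changed: B iterates over consecutive node pairs and appends to the two COO rows directly, eliminating A's per-node guards, the intermediate edge list and the zip transpose.
import Mathlib
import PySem

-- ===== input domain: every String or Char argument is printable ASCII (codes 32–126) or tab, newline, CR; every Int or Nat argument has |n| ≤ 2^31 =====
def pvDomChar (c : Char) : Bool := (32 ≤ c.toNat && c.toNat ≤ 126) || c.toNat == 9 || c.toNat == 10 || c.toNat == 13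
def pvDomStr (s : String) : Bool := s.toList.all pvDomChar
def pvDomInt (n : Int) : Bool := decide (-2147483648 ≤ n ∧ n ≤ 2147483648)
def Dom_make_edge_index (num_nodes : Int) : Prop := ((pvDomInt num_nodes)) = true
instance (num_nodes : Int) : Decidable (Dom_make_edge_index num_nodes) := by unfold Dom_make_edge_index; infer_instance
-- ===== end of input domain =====

-- B builds the two COO rows directly from consecutive node pairs (no edge list, no zip transpose); objective: simpler.

-- ===== PORT A =====
-- hand port of 'list(map(list, zip(*rows)))': exact whenever every row has length exactly 2,
-- which holds for A's 'edges' (every appended element is a 2-element list); zip(*[]) gives [].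
def pyZipStar2 (rows : List (List Int)) : List (List Int) :=
  if rows = [] then []
  else [rows.map (fun r => r.headD 0), rows.map (fun r => r.getD 1 0)]

def stepA (num_nodes : Int) (acc : List (List Int)) (i : Int) : List (List Int) :=
  let acc1 := if 0 < i then acc ++ [[i, i - 1]] else acc
  if i < num_nodes - 1 then acc1 ++ [[i, i + 1]] else acc1

def make_edge_index (num_nodes : Int) : List (List Int) :=
  let edges := (PySem.List.pyRange 0 num_nodes 1).foldl (stepA num_nodes) []
  pyZipStar2 edges

-- ===== PORT B =====
def make_edge_index_alt (num_nodes : Int) : List (List Int) :=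
  let p := (PySem.List.pyRange 0 (num_nodes - 1) 1).foldl
      (fun (sd : List Int × List Int) i => (sd.1 ++ [i, i + 1], sd.2 ++ [i + 1, i])) ([], [])
  if p.1 = [] then [] else [p.1, p.2]

-- ===== PRECONDITION & SPEC =====
def Spec_make_edge_index (num_nodes : Int) (out : List (List Int)) : Prop := out = make_edge_index_alt num_nodes
instance (num_nodes : Int) (out : List (List Int)) : Decidable (Spec_make_edge_index num_nodes out) := by unfold Spec_make_edge_index; infer_instance

-- ===== CLAIM (what is proved, stated in full; the proofs are below) =====
def Claim_equal_make_edge_index : Prop := ∀ (num_nodes : Int), Dom_make_edge_index num_nodes → Spec_make_edge_index num_nodes (make_edge_index num_nodes)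

-- ===== LEMMAS AND PROOFS =====

-- the interleaved edge list A builds, expressed per consecutive pair
def pairEdges (i : Int) : List (List Int) := [[i, i + 1], [i + 1, i]]

-- loop invariant for A's fold: after processing 0..m-1 with m ≤ num_nodes - 1
lemma stepA_inv (n : Int) : ∀ (m : Nat), (m : Int) ≤ n - 1 →
    (PySem.List.pyRange 0 (m : Int) 1).foldl (stepA n) [] =
      if m = 0 then []
      else (PySem.List.pyRange 0 ((m : Int) - 1) 1).flatMap pairEdges ++ [[(m : Int) - 1, (m : Int)]] := by
  intro m
  induction m with
  | zero => intro _; simp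
  | succ k ih =>
    intro hm
    have hk : (k : Int) ≤ n - 1 := by push_cast at hm ⊢; omega
    have hsplit : PySem.List.pyRange 0 ((k : Int) + 1) 1 =
        PySem.List.pyRange 0 (k : Int) 1 ++ [(k : Int)] :=
      PySem.List.pyRange_one_succ_right (by positivity)
    push_cast
    rw [hsplit, List.foldl_append, ih hk]
    rcases Nat.eq_zero_or_pos k with hk0 | hk1
    · subst hk0
      have h1 : (0:Int) < n - 1 := by push_cast at hm; omega
      simp [stepA]
      omega
    · have hkpos : (0:Int) < (k : Int) := by exact_mod_cast hk1
      have hlt : (k : Int) < n - 1 := by push_cast at hm; omega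
      have hks : k ≠ 0 := Nat.pos_iff_ne_zero.mp hk1
      have hsplit2 : PySem.List.pyRange 0 (k : Int) 1 =
          PySem.List.pyRange 0 ((k : Int) - 1) 1 ++ [(k : Int) - 1] := by
        have := PySem.List.pyRange_one_succ_right (a := 0) (b := (k : Int) - 1) (by omega)
        simpa [sub_add_cancel] using this
      rw [if_neg hks]
      simp only [List.foldl_cons, List.foldl_nil]
      rw [show (k : Int) + 1 - 1 = (k : Int) by ring, hsplit2, List.flatMap_append]
      simp [stepA, hk1, hlt, pairEdges]

-- A's edge list is the flat interleaved pair list over range(n-1)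
lemma edges_eq (n : Int) :
    (PySem.List.pyRange 0 n 1).foldl (stepA n) [] =
      (PySem.List.pyRange 0 (n - 1) 1).flatMap pairEdges := by
  by_cases hn : n ≤ 0
  · rw [PySem.List.pyRange_one_eq_nil hn, PySem.List.pyRange_one_eq_nil (by omega)]
    rfl
  · have hn' : 0 < n := by omega
    have hm : ((n - 1).toNat : Int) = n - 1 := Int.toNat_of_nonneg (by omega)
    have hsplit : PySem.List.pyRange 0 n 1 =
        PySem.List.pyRange 0 (n - 1) 1 ++ [n - 1] := by
      have := PySem.List.pyRange_one_succ_right (a := 0) (b := n - 1) (by omega)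
      simpa [sub_add_cancel] using this
    have hinv := stepA_inv n (n - 1).toNat (by omega)
    rw [hm] at hinv
    rw [hsplit, List.foldl_append, hinv]
    rcases eq_or_lt_of_le (by omega : (1:Int) ≤ n) with h1 | h2
    · have : (n - 1).toNat = 0 := by omega
      rw [this]
      simp [stepA, ← h1]
    · have hne : (n - 1).toNat ≠ 0 := by omega
      rw [if_neg hne]
      have hpos : (0:Int) < n - 1 := by omega
      have hsplit2 : PySem.List.pyRange 0 (n - 1) 1 =
          PySem.List.pyRange 0 (n - 2) 1 ++ [n - 2] := by
        have := PySem.List.pyRange_one_succ_right (a := 0) (b := n - 2) (by omega)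
        simpa [show n - 2 + 1 = n - 1 by ring] using this
      rw [hsplit2, List.flatMap_append]
      simp [stepA, h2, pairEdges, show n - 1 - 1 = n - 2 by ring, show n - 2 + 1 = n - 1 by ring]

lemma flatMap_pairEdges_ne_nil {l : List Int} (h : l ≠ []) :
    l.flatMap pairEdges ≠ [] := by
  cases l with
  | nil => exact absurd rfl h
  | cons a t => simp [pairEdges]

-- ===== VERDICT (by name: the statement is the Claim_ definition above) =====
theorem make_edge_index_spec : Claim_equal_make_edge_index := by
  intro n _
  unfold Spec_make_edge_index make_edge_index make_edge_index_alt
  rw [edges_eq n]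
  rw [PySem.List.foldl_prod_mk (f := fun acc i => acc ++ [i, i + 1])
        (g := fun acc i => acc ++ [i + 1, i])]
  rw [PySem.List.foldl_append_eq_flatMap, PySem.List.foldl_append_eq_flatMap]
  rcases eq_or_ne (PySem.List.pyRange 0 (n - 1) 1) [] with hR | hR
  · simp [pyZipStar2, hR]
  · have h1 : (PySem.List.pyRange 0 (n - 1) 1).flatMap pairEdges ≠ [] :=
      flatMap_pairEdges_ne_nil hR
    have h2 : (PySem.List.pyRange 0 (n - 1) 1).flatMap (fun i => [i, i + 1]) ≠ [] := by
      cases hE : PySem.List.pyRange 0 (n - 1) 1 with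
      | nil => exact absurd hE hR
      | cons a t => simp
    rw [pyZipStar2, if_neg h1, if_neg (by simpa using h2)]
    simp [List.map_flatMap, pairEdges]
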